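-- pv_equiv track=rewrite | github.com/JBELE4/algorimos-codigos | juez/juez2/fiestaa.py | relacion
-- ===== SOURCE A (Python) =====
-- from collections import deque
--
-- def relacion(p, grafo, visitado):
--     cola = deque()
--     lista_resultado = []
--     visitado[p] = True
--     cola.append(p)
--     lista_resultado.append(p)
--     while cola:
--         auxiliar = cola.popleft()
--         for a in grafo[auxiliar]:
--             if visitado[a] == False:
--                 visitado[a] = True
--                 cola.append(a)
--                 lista_resultado.append(a)
--
--     lista_resultado.sort()
--     return lista_resultado
-- ===== SOURCE B (Python) =====
-- def relacion(p, grafo, visitado):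
--     # Recursive DFS instead of A's BFS queue; same visitado mutation, sorted at the end.
--     resultado = []
--
--     def visita(u):
--         visitado[u] = True
--         resultado.append(u)
--         for a in grafo[u]:
--             if visitado[a] == False:
--                 visita(a)
--
--     visita(p)
--     resultado.sort()
--     return resultado
-- ===== Notes on version B (the rewrite author's own statement) =====
-- stated objective: simpler
-- what changed: A's iterative BFS with an explicit deque and a separate result list is replaced by a recursive depth-first traversal that marks and collects each node as it descends; since the result is sorted before returning, the visit order is irrelevant and the outputs coincide.
import Mathlib
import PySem

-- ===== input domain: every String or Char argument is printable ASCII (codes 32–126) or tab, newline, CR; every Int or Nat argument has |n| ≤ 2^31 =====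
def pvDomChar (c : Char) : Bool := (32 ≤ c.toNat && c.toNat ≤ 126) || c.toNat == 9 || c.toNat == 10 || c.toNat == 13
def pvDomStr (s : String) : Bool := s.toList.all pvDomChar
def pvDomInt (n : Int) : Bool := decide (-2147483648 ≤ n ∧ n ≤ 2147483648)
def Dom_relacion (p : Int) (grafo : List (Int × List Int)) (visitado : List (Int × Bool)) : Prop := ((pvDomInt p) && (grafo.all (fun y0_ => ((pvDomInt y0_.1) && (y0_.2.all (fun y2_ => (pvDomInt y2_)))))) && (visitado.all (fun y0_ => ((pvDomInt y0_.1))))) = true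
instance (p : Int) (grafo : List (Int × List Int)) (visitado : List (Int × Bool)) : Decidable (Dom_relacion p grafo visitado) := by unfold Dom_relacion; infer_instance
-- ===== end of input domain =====

-- B replaces A's iterative BFS queue by a recursive depth-first traversal (same sort at the
-- end, so visit order is irrelevant); objective: simpler. Python A and B both mutate the
-- visitado dict in the same way; the equivalence proved here is about the return value.

-- ===== PORT A =====
-- A's inner `for a in grafo[auxiliar]` body: state = (cola, visitado, lista_resultado).
-- `visitado[a]` is ported as getD with default true (Python raises KeyError there; Pre_ excludes it).
def relacionStepA (st : List Int × PySem.Dict Int Bool × List Int) (a : Int) :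
    List Int × PySem.Dict Int Bool × List Int :=
  if st.2.1.getD a true == false then
    (st.1 ++ [a], st.2.1.insert a true, st.2.2 ++ [a])
  else st

-- A's `while cola` loop; fuel only makes the recursion structural (it never runs out:
-- each iteration pops one queue element and every enqueue flips a False entry to True).
def relacionLoop (g : PySem.Dict Int (List Int)) :
    Nat → List Int × PySem.Dict Int Bool × List Int → List Int
  | 0, st => st.2.2
  | Nat.succ fuel, (cola, v, res) =>
    match cola with
    | [] => res
    | u :: rest => relacionLoop g fuel ((g.getD u []).foldl relacionStepA (rest, v, res))

def relacion (p : Int) (grafo : List (Int × List Int)) (visitado : List (Int × Bool)) : List Int :=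
  let g := PySem.Dict.mk grafo
  let v := (PySem.Dict.mk visitado).insert p true
  PySem.List.sorted (relacionLoop g (visitado.length + 1) ([p], v, [p])) (fun x => x) false

-- ===== PORT B =====
-- B's recursive `visita`: mark u, append u, recurse into each unvisited neighbour.
-- fuel only makes the recursion structural (each descent flips a False entry to True).
def dfsVisita (g : PySem.Dict Int (List Int)) :
    Nat → Int → PySem.Dict Int Bool × List Int → PySem.Dict Int Bool × List Int
  | 0, _, st => st
  | Nat.succ fuel, u, (v, res) =>
    (g.getD u []).foldl
      (fun st a => if st.1.getD a true == false then dfsVisita g fuel a st else st)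
      (v.insert u true, res ++ [u])

def relacion_alt (p : Int) (grafo : List (Int × List Int)) (visitado : List (Int × Bool)) : List Int :=
  PySem.List.sorted
    (dfsVisita (PySem.Dict.mk grafo) (visitado.length + 2) p (PySem.Dict.mk visitado, [])).2
    (fun x => x) false

-- ===== PRECONDITION & SPEC =====
-- Pre_ states exactly the inputs on which A raises no KeyError: every node in the closure
-- of p under edges that lead through initially-unvisited nodes must be a key of grafo, and
-- every neighbour listed there must be p or a key of visitado (any other node is looked up
-- in visitado before the search can have inserted it).  pvReachClos computes that closure of
-- the INPUT graph by saturation; it is a closure condition on the input, not a copy of either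
-- port (visit order, queue and result list play no role in it).
def pvReachClos (g : PySem.Dict Int (List Int)) (v0 : PySem.Dict Int Bool) :
    Nat → List Int → List Int
  | 0, s => s
  | Nat.succ n, s => pvReachClos g v0 n
      (s.foldl (fun acc x =>
        PySem.Set.update acc ((g.getD x []).filter (fun a => v0.getD a true == false))) s)

def Pre_relacion (p : Int) (grafo : List (Int × List Int)) (visitado : List (Int × Bool)) : Prop :=
  ∀ x ∈ pvReachClos (PySem.Dict.mk grafo) (PySem.Dict.mk visitado) (visitado.length + 1) [p],
    x ∈ grafo.map Prod.fst ∧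
      ∀ a ∈ (PySem.Dict.mk grafo).getD x [], a = p ∨ a ∈ visitado.map Prod.fst
instance (p : Int) (grafo : List (Int × List Int)) (visitado : List (Int × Bool)) : Decidable (Pre_relacion p grafo visitado) := by unfold Pre_relacion; infer_instance

def pvWitness_relacion : Int × (List (Int × List Int)) × (List (Int × Bool)) :=
  (0, [(0, [1]), (1, [0, 2]), (2, [])], [(0, false), (1, false), (2, true)])

def Spec_relacion (p : Int) (grafo : List (Int × List Int)) (visitado : List (Int × Bool)) (out : List Int) : Prop := out = relacion_alt p grafo visitado
instance (p : Int) (grafo : List (Int × List Int)) (visitado : List (Int × Bool)) (out : List Int) : Decidable (Spec_relacion p grafo visitado out) := by unfold Spec_relacion; infer_instance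

-- ===== CLAIM (what is proved, stated in full; the proofs are below) =====
def Claim_equal_relacion : Prop := ∀ (p : Int) (grafo : List (Int × List Int)) (visitado : List (Int × Bool)), Dom_relacion p grafo visitado → Pre_relacion p grafo visitado → Spec_relacion p grafo visitado (relacion p grafo visitado)

-- ===== LEMMAS AND PROOFS =====

def cfFalse (v : PySem.Dict Int Bool) : Nat := v.items.countP (fun kv => kv.2 == false)

lemma countP_flip_le (a : Int) (l : List (Int × Bool)) :
    (l.map (fun p => if p.1 == a then (a, true) else p)).countP (fun kv => kv.2 == false)
      ≤ l.countP (fun kv => kv.2 == false) := by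
  rw [List.countP_map]
  apply List.countP_mono_left
  intro x _ hx
  by_cases h : x.1 == a <;> simp_all

lemma countP_flip_lt (a : Int) (l : List (Int × Bool)) (hm : (a, false) ∈ l) :
    (l.map (fun p => if p.1 == a then (a, true) else p)).countP (fun kv => kv.2 == false)
      < l.countP (fun kv => kv.2 == false) := by
  induction l with
  | nil => simp at hm
  | cons h t ih =>
    simp only [List.map_cons, List.countP_cons]
    rcases List.mem_cons.1 hm with he | ht
    · subst he
      simp only [BEq.rfl, if_true]
      have := countP_flip_le a t
      simp only [List.countP_map] at this ⊢
      simpa using Nat.lt_succ_of_le (by simpa [List.countP_map] using countP_flip_le a t)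
    · have := ih ht
      have hle : (if ((if h.1 == a then (a, true) else h).2 == false) = true then 1 else 0)
          ≤ (if (h.2 == false) = true then (1:Nat) else 0) := by
        by_cases hh : h.1 == a <;> simp [hh]
      omega

lemma cfFalse_insert_le (v : PySem.Dict Int Bool) (a : Int) :
    cfFalse (v.insert a true) ≤ cfFalse v := by
  unfold cfFalse
  rw [PySem.Dict.items_insert]
  by_cases hc : v.contains a = true
  · simp only [hc, if_true]
    exact countP_flip_le a v.items
  · simp only [hc]
    simp [List.countP_append]

lemma cfFalse_insert_lt (v : PySem.Dict Int Bool) (a : Int)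
    (h : v.getD a true = false) : cfFalse (v.insert a true) < cfFalse v := by
  have hc : v.contains a = true := by
    by_cases hc : v.contains a = true
    · exact hc
    · rw [PySem.Dict.getD_of_not_contains v true (by simpa using hc)] at h; simp at h
  have hg : v.get? a = some false := by
    rw [PySem.Dict.getD_eq_get?_getD] at h
    cases hv : v.get? a with
    | none => rw [hv] at h; simp at h
    | some b => rw [hv] at h; simp at h; simp [h]
  have hm := PySem.Dict.mem_items_of_get?_eq_some v hg
  unfold cfFalse
  rw [PySem.Dict.items_insert]
  simp only [hc, if_true]
  exact countP_flip_lt a v.items hm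

-- The set both searches compute: p, plus everything reachable along edges whose target
-- was False in the ORIGINAL visitado (a node marked during the run was False originally).
inductive Vis (g : PySem.Dict Int (List Int)) (v0 : PySem.Dict Int Bool) (p : Int) : Int → Prop
  | root : Vis g v0 p p
  | step {u a : Int} : Vis g v0 p u → a ∈ g.getD u [] → v0.getD a true = false → Vis g v0 p a

-- Invariant tying the evolving dict to the evolving result list.
def SameMark (v0 v : PySem.Dict Int Bool) (res : List Int) : Prop :=
  ∀ x : Int, v.getD x true = true ↔ (v0.getD x true = true ∨ x ∈ res)

def newA : List Int → PySem.Dict Int Bool → List Int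
  | [], _ => []
  | a :: ns, v => if v.getD a true == false then a :: newA ns (v.insert a true) else newA ns v

def updA : List Int → PySem.Dict Int Bool → PySem.Dict Int Bool
  | [], v => v
  | a :: ns, v => if v.getD a true == false then updA ns (v.insert a true) else updA ns v

lemma getD_insert_true (v : PySem.Dict Int Bool) (a x : Int) :
    (v.insert a true).getD x true = if x = a then true else v.getD x true := by
  simp [PySem.Dict.getD_insert]

lemma foldA_eq (ns : List Int) : ∀ (cola : List Int) (v : PySem.Dict Int Bool) (res : List Int),
    ns.foldl relacionStepA (cola, v, res) = (cola ++ newA ns v, updA ns v, res ++ newA ns v) := by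
  induction ns with
  | nil => intro cola v res; simp [newA, updA]
  | cons a ns ih =>
    intro cola v res
    by_cases h : v.getD a true = false
    · simp [newA, updA, relacionStepA, h, ih]
    · have h' : v.getD a true = true := by cases hv : v.getD a true <;> simp_all
      simp [newA, updA, relacionStepA, h', ih]

lemma updA_getD (ns : List Int) : ∀ (v : PySem.Dict Int Bool) (x : Int),
    ((updA ns v).getD x true = true ↔ (v.getD x true = true ∨ x ∈ newA ns v)) := by
  induction ns with
  | nil => intro v x; simp [newA, updA]
  | cons a ns ih =>
    intro v x
    by_cases h : v.getD a true = false
    · simp only [newA, updA, h, BEq.rfl, if_true]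
      rw [ih]
      rw [getD_insert_true]
      by_cases hx : x = a <;> simp [hx, h]
    · have h' : v.getD a true = true := by cases hv : v.getD a true <;> simp_all
      simp only [newA, updA, h', show ((true : Bool) == false) = false from rfl, Bool.false_eq_true, if_false]
      rw [ih]

lemma newA_mem (ns : List Int) : ∀ (v : PySem.Dict Int Bool) (x : Int), x ∈ newA ns v →
    v.getD x true = false ∧ x ∈ ns := by
  induction ns with
  | nil => intro v x h; simp [newA] at h
  | cons a ns ih =>
    intro v x h
    by_cases hf : v.getD a true = false
    · simp only [newA, hf, BEq.rfl, if_true, List.mem_cons] at h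
      rcases h with rfl | h
      · exact ⟨hf, List.mem_cons_self⟩
      · obtain ⟨h1, h2⟩ := ih _ _ h
        rw [getD_insert_true] at h1
        by_cases hx : x = a
        · simp [hx] at h1
        · simp [hx] at h1
          exact ⟨h1, List.mem_cons_of_mem _ h2⟩
    · have h' : v.getD a true = true := by cases hv : v.getD a true <;> simp_all
      simp only [newA, h', show ((true : Bool) == false) = false from rfl, Bool.false_eq_true, if_false] at h
      obtain ⟨h1, h2⟩ := ih _ _ h
      exact ⟨h1, List.mem_cons_of_mem _ h2⟩

lemma newA_nodup (ns : List Int) : ∀ (v : PySem.Dict Int Bool), (newA ns v).Nodup := by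
  induction ns with
  | nil => intro v; simp [newA]
  | cons a ns ih =>
    intro v
    by_cases hf : v.getD a true = false
    · simp only [newA, hf, BEq.rfl, if_true]
      refine List.nodup_cons.2 ⟨?_, ih _⟩
      intro hmem
      have := (newA_mem ns _ a hmem).1
      rw [getD_insert_true] at this; simp at this
    · have h' : v.getD a true = true := by cases hv : v.getD a true <;> simp_all
      simp only [newA, h', show ((true : Bool) == false) = false from rfl, Bool.false_eq_true, if_false]
      exact ih _

lemma updA_marks (ns : List Int) : ∀ (v : PySem.Dict Int Bool) (a : Int), a ∈ ns →
    (updA ns v).getD a true = true := by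
  induction ns with
  | nil => intro v a h; simp at h
  | cons b ns ih =>
    intro v a h
    by_cases hf : v.getD b true = false
    · simp only [updA, hf, BEq.rfl, if_true]
      rcases List.mem_cons.1 h with rfl | h
      · rw [updA_getD]; left; rw [getD_insert_true]; simp
      · exact ih _ _ h
    · have h' : v.getD b true = true := by cases hv : v.getD b true <;> simp_all
      simp only [updA, h', show ((true : Bool) == false) = false from rfl, Bool.false_eq_true, if_false]
      rcases List.mem_cons.1 h with rfl | h
      · rw [updA_getD]; left; exact h'
      · exact ih _ _ h

lemma updA_cf (ns : List Int) : ∀ (v : PySem.Dict Int Bool),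
    cfFalse (updA ns v) + (newA ns v).length ≤ cfFalse v := by
  induction ns with
  | nil => intro v; simp [newA, updA]
  | cons a ns ih =>
    intro v
    by_cases hf : v.getD a true = false
    · simp only [newA, updA, hf, BEq.rfl, if_true, List.length_cons]
      have h1 := ih (v.insert a true)
      have h2 := cfFalse_insert_lt v a hf
      omega
    · have h' : v.getD a true = true := by cases hv : v.getD a true <;> simp_all
      simp only [newA, updA, h', show ((true : Bool) == false) = false from rfl, Bool.false_eq_true, if_false]
      exact ih v

lemma notMem_of_getD_false {v0 v : PySem.Dict Int Bool} {res : List Int} (hsm : SameMark v0 v res)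
    {x : Int} (hx : v.getD x true = false) : v0.getD x true = false ∧ x ∉ res := by
  have := (hsm x).not
  rw [hx] at this
  simp only [Bool.false_eq_true, not_false_iff, true_iff] at this
  push Not at this
  exact ⟨by cases h : v0.getD x true; rfl; exact absurd h this.1, this.2⟩

lemma loopA_char (g : PySem.Dict Int (List Int)) (v0 : PySem.Dict Int Bool) (p : Int) :
    ∀ (fuel : Nat) (cola : List Int) (v : PySem.Dict Int Bool) (res : List Int),
    res.Nodup → (∀ x ∈ cola, x ∈ res) → SameMark v0 v res → (∀ x ∈ res, Vis g v0 p x) →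
    (∀ x ∈ res, x ∉ cola → ∀ a ∈ g.getD x [], v0.getD a true = false → a ∈ res) →
    cfFalse v + cola.length ≤ fuel →
    (∀ x ∈ res, x ∈ relacionLoop g fuel (cola, v, res)) ∧
    (relacionLoop g fuel (cola, v, res)).Nodup ∧
    (∀ x ∈ relacionLoop g fuel (cola, v, res), Vis g v0 p x) ∧
    (∀ x ∈ relacionLoop g fuel (cola, v, res), ∀ a ∈ g.getD x [],
      v0.getD a true = false → a ∈ relacionLoop g fuel (cola, v, res)) := by
  intro fuel
  induction fuel with
  | zero =>
    intro cola v res hnd hcr hsm hsnd hcls hfuel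
    have hc : cola = [] := by
      cases cola with
      | nil => rfl
      | cons a t => simp at hfuel
    subst hc
    refine ⟨fun x hx => hx, hnd, hsnd, ?_⟩
    intro x hx a ha hf
    exact hcls x hx (by simp) a ha hf
  | succ fuel ih =>
    intro cola v res hnd hcr hsm hsnd hcls hfuel
    cases cola with
    | nil =>
      simp only [relacionLoop]
      refine ⟨fun x hx => hx, hnd, hsnd, ?_⟩
      intro x hx a ha hf
      exact hcls x hx (by simp) a ha hf
    | cons u rest =>
      simp only [relacionLoop]
      rw [foldA_eq]
      set ns := g.getD u [] with hns
      -- facts about the new elements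
      have hnewf : ∀ x ∈ newA ns v, v.getD x true = false ∧ x ∈ ns := fun x hx => newA_mem ns v x hx
      have hnewnotres : ∀ x ∈ newA ns v, x ∉ res := by
        intro x hx
        exact (notMem_of_getD_false hsm (hnewf x hx).1).2
      have hnd' : (res ++ newA ns v).Nodup := by
        refine List.Nodup.append hnd (newA_nodup ns v) ?_
        intro x hx hx'
        exact hnewnotres x hx' hx
      have hcr' : ∀ x ∈ rest ++ newA ns v, x ∈ res ++ newA ns v := by
        intro x hx
        rcases List.mem_append.1 hx with h | h
        · exact List.mem_append.2 (Or.inl (hcr x (List.mem_cons_of_mem _ h)))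
        · exact List.mem_append.2 (Or.inr h)
      have hsm' : SameMark v0 (updA ns v) (res ++ newA ns v) := by
        intro x
        rw [updA_getD, hsm x, List.mem_append]
        tauto
      have hsnd' : ∀ x ∈ res ++ newA ns v, Vis g v0 p x := by
        intro x hx
        rcases List.mem_append.1 hx with h | h
        · exact hsnd x h
        · obtain ⟨hf, hmem⟩ := hnewf x h
          exact Vis.step (hsnd u (hcr u List.mem_cons_self)) hmem
            (notMem_of_getD_false hsm hf).1
      have hcls' : ∀ x ∈ res ++ newA ns v, x ∉ rest ++ newA ns v →
          ∀ a ∈ g.getD x [], v0.getD a true = false → a ∈ res ++ newA ns v := by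
        intro x hx hnin a ha hf
        rcases List.mem_append.1 hx with h | h
        · by_cases hxu : x = u
          · subst hxu
            have hmark : (updA ns v).getD a true = true := updA_marks ns v a (hns ▸ ha)
            rcases (hsm' a).1 hmark with h0 | h0
            · rw [hf] at h0; simp at h0
            · exact h0
          · have hxnc : x ∉ u :: rest := by
              intro hmem
              rcases List.mem_cons.1 hmem with h' | h'
              · exact hxu h'
              · exact hnin (List.mem_append.2 (Or.inl h'))
            exact List.mem_append.2 (Or.inl (hcls x h hxnc a ha hf))
        · exact absurd (List.mem_append.2 (Or.inr h)) hnin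
      have hfuel' : cfFalse (updA ns v) + (rest ++ newA ns v).length ≤ fuel := by
        have h1 := updA_cf ns v
        simp only [List.length_append, List.length_cons] at hfuel ⊢
        omega
      obtain ⟨c1, c2, c3, c4⟩ := ih (rest ++ newA ns v) (updA ns v) (res ++ newA ns v)
        hnd' hcr' hsm' hsnd' hcls' hfuel'
      exact ⟨fun x hx => c1 x (List.mem_append.2 (Or.inl hx)), c2, c3, c4⟩

lemma dfsFold_char (g : PySem.Dict Int (List Int)) (v0 : PySem.Dict Int Bool) (p : Int) (fuel : Nat)
    (IH : ∀ (u : Int) (v : PySem.Dict Int Bool) (res : List Int),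
      cfFalse (v.insert u true) + 1 ≤ fuel →
      Vis g v0 p u → u ∉ res → res.Nodup → SameMark v0 v res → (∀ x ∈ res, Vis g v0 p x) →
      ∃ nw : List Int,
        (dfsVisita g fuel u (v, res)).2 = res ++ nw ∧ u ∈ nw ∧
        (res ++ nw).Nodup ∧
        SameMark v0 (dfsVisita g fuel u (v, res)).1 (res ++ nw) ∧
        (∀ x ∈ res ++ nw, Vis g v0 p x) ∧
        (∀ x, v.getD x true = true → (dfsVisita g fuel u (v, res)).1.getD x true = true) ∧
        cfFalse (dfsVisita g fuel u (v, res)).1 ≤ cfFalse (v.insert u true) ∧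
        (∀ x ∈ nw, ∀ a ∈ g.getD x [], (dfsVisita g fuel u (v, res)).1.getD a true = true)) :
    ∀ (ns : List Int), (∀ a ∈ ns, v0.getD a true = false → Vis g v0 p a) →
    ∀ (v1 : PySem.Dict Int Bool) (res1 : List Int),
    res1.Nodup → SameMark v0 v1 res1 → (∀ x ∈ res1, Vis g v0 p x) → cfFalse v1 ≤ fuel →
    ∃ nw2 : List Int,
      (ns.foldl (fun st a => if st.1.getD a true == false then dfsVisita g fuel a st else st) (v1, res1)).2 = res1 ++ nw2 ∧
      (res1 ++ nw2).Nodup ∧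
      SameMark v0 (ns.foldl (fun st a => if st.1.getD a true == false then dfsVisita g fuel a st else st) (v1, res1)).1 (res1 ++ nw2) ∧
      (∀ x ∈ res1 ++ nw2, Vis g v0 p x) ∧
      (∀ x, v1.getD x true = true →
        (ns.foldl (fun st a => if st.1.getD a true == false then dfsVisita g fuel a st else st) (v1, res1)).1.getD x true = true) ∧
      cfFalse (ns.foldl (fun st a => if st.1.getD a true == false then dfsVisita g fuel a st else st) (v1, res1)).1 ≤ cfFalse v1 ∧
      (∀ a ∈ ns,
        (ns.foldl (fun st a => if st.1.getD a true == false then dfsVisita g fuel a st else st) (v1, res1)).1.getD a true = true) ∧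
      (∀ x ∈ nw2, ∀ a ∈ g.getD x [],
        (ns.foldl (fun st a => if st.1.getD a true == false then dfsVisita g fuel a st else st) (v1, res1)).1.getD a true = true) := by
  intro ns
  induction ns with
  | nil =>
    intro _ v1 res1 hnd hsm hsnd hcf
    exact ⟨[], by simp, by simp [hnd], by simpa using hsm, by simpa using hsnd,
      fun x hx => hx, le_refl _, by simp, by simp⟩
  | cons a ns ihns =>
    intro hVns v1 res1 hnd hsm hsnd hcf
    simp only [List.foldl_cons]
    cases hv : v1.getD a true with
    | false =>
      simp only [BEq.rfl, if_true]
      obtain ⟨hv0f, hanr⟩ := notMem_of_getD_false hsm hv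
      have hVa : Vis g v0 p a := hVns a List.mem_cons_self hv0f
      have hfa : cfFalse (v1.insert a true) + 1 ≤ fuel := by
        have := cfFalse_insert_lt v1 a hv; omega
      obtain ⟨nwa, e1, hau, e3, e2, e4, e5, e6, e7⟩ := IH a v1 res1 hfa hVa hanr hnd hsm hsnd
      set st2 := dfsVisita g fuel a (v1, res1) with hst2
      have hcf2 : cfFalse st2.1 ≤ fuel := by
        have := cfFalse_insert_lt v1 a hv; omega
      have hsm2 : SameMark v0 st2.1 st2.2 := by rw [e1]; exact e2
      have hnd2 : st2.2.Nodup := by rw [e1]; exact e3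
      have hcfe : cfFalse st2.1 ≤ cfFalse (v1.insert a true) := e6
      have hsnd2 : ∀ x ∈ st2.2, Vis g v0 p x := by rw [e1]; exact e4
      obtain ⟨nw2', f1, f2, f3, f4, f5, f6, f7, f8⟩ :=
        ihns (fun b hb => hVns b (List.mem_cons_of_mem _ hb)) st2.1 st2.2 hnd2 hsm2 hsnd2 hcf2
      simp only [Prod.mk.eta] at f1 f2 f3 f4 f5 f6 f7 f8
      refine ⟨nwa ++ nw2', ?_, ?_, ?_, ?_, ?_, ?_, ?_, ?_⟩
      · rw [f1, e1, List.append_assoc]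
      · rw [← List.append_assoc, ← e1]; exact f2
      · rw [← List.append_assoc, ← e1]; exact f3
      · rw [← List.append_assoc, ← e1]; exact f4
      · intro x hx; exact f5 x (e5 x hx)
      · have := cfFalse_insert_lt v1 a hv; omega
      · intro b hb
        rcases List.mem_cons.1 hb with rfl | hb
        · have hmark : st2.1.getD b true = true := by
            rw [hsm2 b, e1]
            right; exact List.mem_append.2 (Or.inr hau)
          exact f5 b hmark
        · exact f7 b hb
      · intro x hx b hb
        rcases List.mem_append.1 hx with h | h
        · exact f5 b (e7 x h b hb)
        · exact f8 x h b hb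
    | true =>
      simp only [show ((true : Bool) == false) = false from rfl, Bool.false_eq_true, if_false]
      obtain ⟨nw2', f1, f2, f3, f4, f5, f6, f7, f8⟩ :=
        ihns (fun b hb => hVns b (List.mem_cons_of_mem _ hb)) v1 res1 hnd hsm hsnd hcf
      refine ⟨nw2', f1, f2, f3, f4, f5, f6, ?_, f8⟩
      intro b hb
      rcases List.mem_cons.1 hb with rfl | hb
      · exact f5 b hv
      · exact f7 b hb

lemma dfs_char (g : PySem.Dict Int (List Int)) (v0 : PySem.Dict Int Bool) (p : Int) :
    ∀ (fuel : Nat) (u : Int) (v : PySem.Dict Int Bool) (res : List Int),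
    cfFalse (v.insert u true) + 1 ≤ fuel →
    Vis g v0 p u → u ∉ res → res.Nodup → SameMark v0 v res → (∀ x ∈ res, Vis g v0 p x) →
    ∃ nw : List Int,
      (dfsVisita g fuel u (v, res)).2 = res ++ nw ∧ u ∈ nw ∧
      (res ++ nw).Nodup ∧
      SameMark v0 (dfsVisita g fuel u (v, res)).1 (res ++ nw) ∧
      (∀ x ∈ res ++ nw, Vis g v0 p x) ∧
      (∀ x, v.getD x true = true → (dfsVisita g fuel u (v, res)).1.getD x true = true) ∧
      cfFalse (dfsVisita g fuel u (v, res)).1 ≤ cfFalse (v.insert u true) ∧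
      (∀ x ∈ nw, ∀ a ∈ g.getD x [], (dfsVisita g fuel u (v, res)).1.getD a true = true) := by
  intro fuel
  induction fuel with
  | zero => intro u v res hfuel; omega
  | succ fuel ih =>
    intro u v res hfuel hVu hunr hnd hsm hsnd
    simp only [dfsVisita]
    have hnd1 : (res ++ [u]).Nodup := by
      refine List.Nodup.append hnd (List.nodup_singleton u) ?_
      intro a ha hb
      rw [List.mem_singleton] at hb
      subst hb; exact hunr ha
    have hsm1 : SameMark v0 (v.insert u true) (res ++ [u]) := by
      intro x
      rw [getD_insert_true]
      by_cases hx : x = u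
      · subst hx; simp
      · simp only [hx, if_false, List.mem_append, List.mem_singleton, or_false]
        exact hsm x
    have hsnd1 : ∀ x ∈ res ++ [u], Vis g v0 p x := by
      intro x hx
      rcases List.mem_append.1 hx with h | h
      · exact hsnd x h
      · rw [List.mem_singleton] at h; subst h; exact hVu
    have hVns : ∀ a ∈ g.getD u [], v0.getD a true = false → Vis g v0 p a :=
      fun a ha hf => Vis.step hVu ha hf
    have hcf1 : cfFalse (v.insert u true) ≤ fuel := by omega
    obtain ⟨nw2, f1, f2, f3, f4, f5, f6, f7, f8⟩ :=
      dfsFold_char g v0 p fuel ih (g.getD u []) hVns (v.insert u true) (res ++ [u])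
        hnd1 hsm1 hsnd1 hcf1
    refine ⟨u :: nw2, ?_, List.mem_cons_self, ?_, ?_, ?_, ?_, f6, ?_⟩
    · rw [f1, List.append_assoc]; rfl
    · rw [show res ++ u :: nw2 = (res ++ [u]) ++ nw2 by simp]; exact f2
    · rw [show res ++ u :: nw2 = (res ++ [u]) ++ nw2 by simp]; exact f3
    · rw [show res ++ u :: nw2 = (res ++ [u]) ++ nw2 by simp]; exact f4
    · intro x hx
      apply f5
      rw [getD_insert_true]
      by_cases hxu : x = u <;> simp [hxu, hx]
    · intro x hx b hb
      rcases List.mem_cons.1 hx with rfl | hx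
      · exact f7 b hb
      · exact f8 x hx b hb

lemma vis_subset (g : PySem.Dict Int (List Int)) (v0 : PySem.Dict Int Bool) (p : Int)
    (S : List Int) (hp : p ∈ S)
    (hcl : ∀ x ∈ S, ∀ a ∈ g.getD x [], v0.getD a true = false → a ∈ S) :
    ∀ x, Vis g v0 p x → x ∈ S := by
  intro x h
  induction h with
  | root => exact hp
  | step hu hmem hf ih => exact hcl _ ih _ hmem hf

lemma cfFalse_mk_le (visitado : List (Int × Bool)) :
    cfFalse (PySem.Dict.mk visitado) ≤ visitado.length := by
  unfold cfFalse
  exact List.countP_le_length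

lemma resA_char (p : Int) (grafo : List (Int × List Int)) (visitado : List (Int × Bool)) :
    (relacionLoop (PySem.Dict.mk grafo) (visitado.length + 1)
        ([p], (PySem.Dict.mk visitado).insert p true, [p])).Nodup ∧
    (∀ x, x ∈ relacionLoop (PySem.Dict.mk grafo) (visitado.length + 1)
        ([p], (PySem.Dict.mk visitado).insert p true, [p]) ↔
      Vis (PySem.Dict.mk grafo) (PySem.Dict.mk visitado) p x) := by
  set g := PySem.Dict.mk grafo
  set v0 := PySem.Dict.mk visitado
  have hsm : SameMark v0 (v0.insert p true) [p] := by
    intro x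
    rw [getD_insert_true]
    by_cases hx : x = p
    · subst hx; simp
    · simp [hx]
  have hfuel : cfFalse (v0.insert p true) + [p].length ≤ visitado.length + 1 := by
    have h1 := cfFalse_insert_le v0 p
    have h2 : cfFalse v0 ≤ visitado.length := cfFalse_mk_le visitado
    simp only [List.length_singleton]
    omega
  obtain ⟨c1, c2, c3, c4⟩ := loopA_char g v0 p (visitado.length + 1) [p] (v0.insert p true) [p]
    (List.nodup_singleton p) (fun x hx => hx) hsm
    (fun x hx => by rw [List.mem_singleton] at hx; subst hx; exact Vis.root)
    (fun x hx hnx => absurd hx hnx) hfuel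
  refine ⟨c2, fun x => ⟨c3 x, ?_⟩⟩
  exact fun h => vis_subset g v0 p _ (c1 p (List.mem_singleton_self p)) c4 x h

lemma resB_char (p : Int) (grafo : List (Int × List Int)) (visitado : List (Int × Bool)) :
    (dfsVisita (PySem.Dict.mk grafo) (visitado.length + 2) p (PySem.Dict.mk visitado, [])).2.Nodup ∧
    (∀ x, x ∈ (dfsVisita (PySem.Dict.mk grafo) (visitado.length + 2) p (PySem.Dict.mk visitado, [])).2 ↔
      Vis (PySem.Dict.mk grafo) (PySem.Dict.mk visitado) p x) := by
  set g := PySem.Dict.mk grafo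
  set v0 := PySem.Dict.mk visitado
  have hfuel : cfFalse (v0.insert p true) + 1 ≤ visitado.length + 2 := by
    have h1 := cfFalse_insert_le v0 p
    have h2 : cfFalse v0 ≤ visitado.length := cfFalse_mk_le visitado
    omega
  obtain ⟨nw, e1, hpm, e2, e3, e4, e5, e6, e7⟩ :=
    dfs_char g v0 p (visitado.length + 2) p v0 []
      hfuel Vis.root (List.not_mem_nil) List.nodup_nil
      (fun x => by simp) (by simp)
  rw [List.nil_append] at e1 e2 e3 e4
  rw [e1]
  refine ⟨e2, fun x => ⟨e4 x, ?_⟩⟩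
  refine vis_subset g v0 p nw hpm ?_ x
  intro y hy a ha hf
  have hm := e7 y hy a ha
  rcases (e3 a).1 hm with h0 | h0
  · rw [hf] at h0; simp at h0
  · exact h0

-- ===== VERDICT (by name: the statement is the Claim_ definition above) =====
theorem relacion_spec : Claim_equal_relacion := by
  intro p grafo visitado _ _
  unfold Spec_relacion relacion relacion_alt
  obtain ⟨hA, hAmem⟩ := resA_char p grafo visitado
  obtain ⟨hB, hBmem⟩ := resB_char p grafo visitado
  apply PySem.List.sorted_eq_of_perm_of_pairwise_lt
  · exact (PySem.List.sorted_perm _ _ _).trans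
      ((List.perm_ext_iff_of_nodup hB hA).2 (fun a => (hBmem a).trans (hAmem a).symm))
  · have hle := PySem.List.sorted_pairwise
      (dfsVisita (PySem.Dict.mk grafo) (visitado.length + 2) p (PySem.Dict.mk visitado, [])).2
      (fun x : Int => x)
    have hnd : (PySem.List.sorted
        (dfsVisita (PySem.Dict.mk grafo) (visitado.length + 2) p (PySem.Dict.mk visitado, [])).2
        (fun x : Int => x) false).Nodup :=
      ((PySem.List.sorted_perm _ _ _).nodup_iff).2 hB
    exact (hle.and hnd).imp (fun h => lt_of_le_of_ne h.1 h.2)
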